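-- pv_equiv track=rewrite | github.com/Joespider/wtd | wtd.py | InsertArgs
-- ===== SOURCE A (Python) =====
-- def InsertArgs(TheCommand,ArgVals):
-- 	TheNewCommand = TheCommand
--
-- 	if "," in ArgVals:
-- 		NewArgsVals = ArgVals.split(",")
-- 		ArgVals = "|".join(NewArgsVals)
--
-- 	if "=" in ArgVals and "|" not in ArgVals:
-- 		ParseArgs = ArgVals.split("=",1)
-- 		TheKey = "<"+ParseArgs[0]+">"
-- 		TheValue = ParseArgs[1]
-- 		if TheKey in TheNewCommand:
-- 			NewCommand = TheNewCommand.split(TheKey)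
-- 			TheNewCommand = TheValue.join(NewCommand)
--
-- 	elif "=" in ArgVals and "|" in ArgVals:
-- 		MultiArgs = ArgVals.split("|")
-- 		for arg in MultiArgs:
-- 			TheNewCommand = InsertArgs(TheNewCommand,arg)
-- 	return TheNewCommand
-- ===== SOURCE B (Python) =====
-- def InsertArgs(TheCommand, ArgVals):
--     result = TheCommand
--     for part in ArgVals.replace(",", "|").split("|"):
--         if "=" in part:
--             key, value = part.split("=", 1)
--             result = result.replace("<" + key + ">", value)
--     return result
-- ===== Notes on version B (the rewrite author's own statement) =====
-- stated objective: simpler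
-- what changed: Replaces A's recursion (re-entering InsertArgs per '|'-separated arg, with a duplicated base case) by one flat loop: normalise ',' to '|', split once, and apply one str.replace per 'key=value' part.
import Mathlib
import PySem

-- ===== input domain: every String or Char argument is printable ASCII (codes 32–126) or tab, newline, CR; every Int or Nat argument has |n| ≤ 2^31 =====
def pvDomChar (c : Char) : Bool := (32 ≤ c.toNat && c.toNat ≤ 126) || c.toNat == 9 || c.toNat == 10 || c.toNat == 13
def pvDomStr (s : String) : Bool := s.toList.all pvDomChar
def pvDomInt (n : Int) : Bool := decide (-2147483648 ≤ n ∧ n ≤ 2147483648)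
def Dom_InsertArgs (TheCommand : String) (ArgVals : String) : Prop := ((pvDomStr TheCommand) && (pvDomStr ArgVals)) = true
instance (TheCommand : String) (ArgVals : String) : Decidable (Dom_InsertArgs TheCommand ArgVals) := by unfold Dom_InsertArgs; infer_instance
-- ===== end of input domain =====

-- B replaces A's recursion (re-entering InsertArgs for each '|'-separated argument, with a
-- duplicated single-argument base case) by one flat loop over the normalised parts; objective: simpler.

-- ===== PORT A =====
-- fuel guard for A's recursion (A recurses once per '|'-separated argument; each recursive
-- argument contains no ',' or '|', so pvMu strictly bounds the depth — proved in
-- pvMu_lt_of_mem_split below; the fuel only makes the same computation total)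
def pvMu (s : List Char) : Nat := s.count ',' + s.count '|'

-- literal transliteration of A (on `List Char`; the String wrapper follows)
def InsertArgsFuel : Nat → List Char → List Char → List Char
  | 0, TheCommand, _ => TheCommand   -- never reached: fuel starts above the recursion depth
  | Nat.succ fuel, TheCommand, ArgVals =>
    -- TheNewCommand = TheCommand
    let TheNewCommand := TheCommand
    -- if "," in ArgVals: ArgVals = "|".join(ArgVals.split(","))
    let ArgVals2 := if PySem.Chars.isIn [','] ArgVals = true
                    then PySem.Chars.join ['|'] (PySem.Chars.splitOn ArgVals [','])
                    else ArgVals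
    -- if "=" in ArgVals and "|" not in ArgVals:
    if PySem.Chars.isIn ['='] ArgVals2 = true ∧ PySem.Chars.isIn ['|'] ArgVals2 = false then
      -- ParseArgs = ArgVals.split("=",1); TheKey = "<"+ParseArgs[0]+">"; TheValue = ParseArgs[1]
      let ParseArgs := PySem.Chars.splitOnMax ArgVals2 ['='] 1
      let TheKey := '<' :: PySem.List.pyGetD ParseArgs 0 [] ++ ['>']
      let TheValue := PySem.List.pyGetD ParseArgs 1 []
      -- if TheKey in TheNewCommand: TheNewCommand = TheValue.join(TheNewCommand.split(TheKey))
      if PySem.Chars.isIn TheKey TheNewCommand = true then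
        PySem.Chars.join TheValue (PySem.Chars.splitOn TheNewCommand TheKey)
      else TheNewCommand
    -- elif "=" in ArgVals and "|" in ArgVals: for arg in ArgVals.split("|"): TheNewCommand = InsertArgs(TheNewCommand, arg)
    else if PySem.Chars.isIn ['='] ArgVals2 = true ∧ PySem.Chars.isIn ['|'] ArgVals2 = true then
      (PySem.Chars.splitOn ArgVals2 ['|']).foldl
        (fun cmd arg => InsertArgsFuel fuel cmd arg) TheNewCommand
    else TheNewCommand

def InsertArgs (TheCommand : String) (ArgVals : String) : String :=
  String.ofList (InsertArgsFuel (pvMu ArgVals.toList + 1) TheCommand.toList ArgVals.toList)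

-- ===== PORT B =====
-- literal transliteration of B: result = TheCommand; for part in ArgVals.replace(",","|").split("|"):
--   if "=" in part: key, value = part.split("=",1); result = result.replace("<"+key+">", value)
def InsertArgsAltC (TheCommand ArgVals : List Char) : List Char :=
  (PySem.Chars.splitOn (PySem.Chars.replace ArgVals [','] ['|']) ['|']).foldl
    (fun result part =>
      if PySem.Chars.isIn ['='] part = true then
        let ps := PySem.Chars.splitOnMax part ['='] 1
        PySem.Chars.replace result ('<' :: PySem.List.pyGetD ps 0 [] ++ ['>']) (PySem.List.pyGetD ps 1 [])
      else result)
    TheCommand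

-- B's loop body as a named function (definitionally the lambda in InsertArgsAltC)

def InsertArgs_alt (TheCommand : String) (ArgVals : String) : String :=
  String.ofList (InsertArgsAltC TheCommand.toList ArgVals.toList)

-- ===== PRECONDITION & SPEC =====
def Spec_InsertArgs (TheCommand : String) (ArgVals : String) (out : String) : Prop := out = InsertArgs_alt TheCommand ArgVals
instance (TheCommand : String) (ArgVals : String) (out : String) : Decidable (Spec_InsertArgs TheCommand ArgVals out) := by unfold Spec_InsertArgs; infer_instance

-- ===== CLAIM (what is proved, stated in full; the proofs are below) =====
def Claim_equal_InsertArgs : Prop := ∀ (TheCommand : String) (ArgVals : String), Dom_InsertArgs TheCommand ArgVals → Spec_InsertArgs TheCommand ArgVals (InsertArgs TheCommand ArgVals)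

-- ===== LEMMAS AND PROOFS =====
def pvRepl (old new : List Char) : List Char → List Char
  | [] => []
  | c :: t =>
    if h : old.isPrefixOf (c :: t) ∧ old ≠ [] then new ++ pvRepl old new (List.drop old.length (c :: t))
    else c :: pvRepl old new t
termination_by l => l.length
decreasing_by
  · have := List.length_pos_of_ne_nil h.2
    simp [List.length_drop]; omega
  · simp

def pvSplitA (old : List Char) : List Char → List Char → List (List Char)
  | [], cur => [cur.reverse]
  | c :: t, cur =>
    if h : old.isPrefixOf (c :: t) ∧ old ≠ [] then cur.reverse :: pvSplitA old (List.drop old.length (c :: t)) []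
    else pvSplitA old t (c :: cur)
termination_by l _ => l.length
decreasing_by
  · have := List.length_pos_of_ne_nil h.2
    simp [List.length_drop]; omega
  · simp

theorem pvSplitGo_eq (old : List Char) (hold : old ≠ []) :
    ∀ fuel l cur acc, l.length ≤ fuel →
      PySem.Chars.splitOn.go old fuel l cur acc = acc.reverse ++ pvSplitA old l cur := by
  intro fuel
  induction fuel with
  | zero =>
    intro l cur acc hl
    have : l = [] := by cases l <;> simp_all
    subst this
    simp [PySem.Chars.splitOn.go, pvSplitA]
  | succ f ih =>
    intro l cur acc hl
    cases l with
    | nil => simp [PySem.Chars.splitOn.go, pvSplitA]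
    | cons c t =>
      rw [PySem.Chars.splitOn.go]
      by_cases hp : old.isPrefixOf (c :: t) = true
      · have hlen := List.length_pos_of_ne_nil hold
        rw [if_pos hp, ih _ _ _ (by simp only [List.length_drop, List.length_cons]; simp at hl; omega)]
        rw [pvSplitA, dif_pos ⟨hp, hold⟩]
        simp
      · rw [if_neg hp, ih _ _ _ (by simp at hl ⊢; omega)]
        rw [pvSplitA, dif_neg (by simp [hp])]

theorem pvSplitOn_eq (old l : List Char) (hold : old ≠ []) :
    PySem.Chars.splitOn l old = pvSplitA old l [] := by
  rw [PySem.Chars.splitOn]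
  rw [pvSplitGo_eq old hold _ _ _ _ (by omega)]
  simp

theorem pvSplitA_ne_nil (old : List Char) : ∀ l cur, pvSplitA old l cur ≠ [] := by
  intro l cur
  induction l, cur using pvSplitA.induct old with
  | case1 cur => simp [pvSplitA]
  | case2 c t cur h ih => intro hc; rw [pvSplitA.eq_def] at hc; simp only [dif_pos h] at hc; exact (List.cons_ne_nil _ _) hc
  | case3 c t cur h ih => intro hc; rw [pvSplitA.eq_def] at hc; simp only [dif_neg h] at hc; exact ih hc

theorem pvJoin_cons (sep x : List Char) (xs : List (List Char)) :
    PySem.Chars.join sep (x :: xs) = x ++ (if xs.isEmpty then [] else sep ++ PySem.Chars.join sep xs) := by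
  cases xs with
  | nil => simp [PySem.Chars.join, List.intercalate]
  | cons y ys => simp [PySem.Chars.join, List.intercalate]

theorem pvJoin_splitA (old new : List Char) (_hold : old ≠ []) :
    ∀ l cur, PySem.Chars.join new (pvSplitA old l cur) = cur.reverse ++ pvRepl old new l := by
  intro l cur
  induction l, cur using pvSplitA.induct old with
  | case1 cur => simp [pvSplitA, pvRepl, PySem.Chars.join, List.intercalate]
  | case2 c t cur h ih =>
    rw [pvSplitA.eq_def]; simp only [dif_pos h]
    rw [pvJoin_cons, if_neg (by simp [pvSplitA_ne_nil old _ []]), ih]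
    rw [pvRepl, dif_pos h]
    simp
  | case3 c t cur h ih =>
    rw [pvSplitA.eq_def]; simp only [dif_neg h]
    rw [ih, pvRepl, dif_neg h]
    simp

theorem pvRepl_single (a b : Char) (l : List Char) :
    pvRepl [a] [b] l = l.map (fun c => if c = a then b else c) := by
  induction l with
  | nil => simp [pvRepl]
  | cons c t ih =>
    by_cases hc : c = a
    · subst hc
      rw [pvRepl, dif_pos (by simp)]
      simp [ih]
    · rw [pvRepl, dif_neg (by simp [List.isPrefixOf]; intro hh; exact absurd hh.symm hc)]
      simp [hc, ih]

theorem pvMem_splitA_single (a : Char) :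
    ∀ l cur p, p ∈ pvSplitA [a] l cur → a ∉ cur →
      a ∉ p ∧ ∀ d ∈ p, d ∈ cur ∨ d ∈ l := by
  intro l cur
  induction l, cur using pvSplitA.induct [a] with
  | case1 cur =>
    intro p hp hcur
    simp [pvSplitA] at hp
    subst hp
    constructor
    · simp; exact hcur
    · intro d hd; left; simpa using hd
  | case2 c t cur h ih =>
    intro p hp hcur
    rw [pvSplitA.eq_def] at hp; simp only [dif_pos h] at hp
    rcases List.mem_cons.mp hp with rfl | hp'
    · constructor
      · simp; exact hcur
      · intro d hd; left; simpa using hd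
    · have := ih _ hp' (by simp)
      refine ⟨this.1, fun d hd => ?_⟩
      rcases this.2 d hd with h1 | h2
      · simp at h1
      · right; right; exact List.mem_of_mem_drop h2
  | case3 c t cur h ih =>
    intro p hp hcur
    have hca : c ≠ a := by
      intro hc; subst hc
      exact h ⟨by simp [List.isPrefixOf], by simp⟩
    rw [pvSplitA.eq_def] at hp; simp only [dif_neg h] at hp
    have hnc : a ∉ c :: cur := by
      simp only [List.mem_cons]
      rintro (rfl | hm)
      · exact hca rfl
      · exact hcur hm
    have := ih _ hp hnc
    refine ⟨this.1, fun d hd => ?_⟩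
    rcases this.2 d hd with h1 | h2
    · rcases List.mem_cons.mp h1 with rfl | hcc
      · right; simp
      · left; exact hcc
    · right; right; exact h2

theorem pvIsIn_single (a : Char) (s : List Char) :
    PySem.Chars.isIn [a] s = true ↔ a ∈ s := by
  rw [PySem.Chars.isIn_iff_infix]; exact List.singleton_infix_iff a s

theorem pvConv_eq_map (av : List Char) :
    (if PySem.Chars.isIn [','] av = true
     then PySem.Chars.join ['|'] (PySem.Chars.splitOn av [','])
     else av) = av.map (fun c => if c = ',' then '|' else c) := by
  by_cases h : PySem.Chars.isIn [','] av = true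
  · rw [if_pos h, pvSplitOn_eq _ _ (by simp), pvJoin_splitA _ _ (by simp), pvRepl_single]
    simp
  · rw [if_neg h]
    have hm : ',' ∉ av := fun hc => h ((pvIsIn_single ',' av).mpr hc)
    symm
    conv_rhs => rw [← List.map_id av]
    refine List.map_congr_left ?_
    intro c hc
    rw [if_neg (fun (hh : c = ',') => hm (hh ▸ hc))]
    rfl

theorem pvNoComma_map (av : List Char) : ',' ∉ av.map (fun c => if c = ',' then '|' else c) := by
  intro h
  rcases List.mem_map.mp h with ⟨c, hc, hfc⟩
  by_cases h' : c = ',' <;> simp [h'] at hfc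

theorem pvMu_lt_of_mem_split (ArgVals A2 arg : List Char)
    (hA2 : A2 = if PySem.Chars.isIn [','] ArgVals = true
                then PySem.Chars.join ['|'] (PySem.Chars.splitOn ArgVals [','])
                else ArgVals)
    (hbar : PySem.Chars.isIn ['|'] A2 = true)
    (hm : arg ∈ PySem.Chars.splitOn A2 ['|']) : pvMu arg < pvMu ArgVals := by
  rw [pvConv_eq_map] at hA2
  subst hA2
  rw [pvSplitOn_eq _ _ (by simp)] at hm
  have hprop := pvMem_splitA_single '|' _ _ _ hm (by simp)
  have hnb : '|' ∉ arg := hprop.1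
  have hnc : ',' ∉ arg := by
    intro hc
    rcases hprop.2 ',' hc with h1 | h2
    · simp at h1
    · exact pvNoComma_map ArgVals h2
  have hz : pvMu arg = 0 := by
    unfold pvMu
    rw [List.count_eq_zero.mpr hnc, List.count_eq_zero.mpr hnb]
  have hpos : 0 < pvMu ArgVals := by
    have hb : '|' ∈ ArgVals.map (fun c => if c = ',' then '|' else c) :=
      (pvIsIn_single _ _).mp hbar
    rcases List.mem_map.mp hb with ⟨c, hc, hfc⟩
    by_cases h' : c = ','
    · subst h'
      have := List.count_pos_iff.mpr hc
      unfold pvMu; omega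
    · simp [h'] at hfc
      subst hfc
      have := List.count_pos_iff.mpr hc
      unfold pvMu; omega
  omega


theorem pvSplitA_single_no_occ (a : Char) :
    ∀ l cur, a ∉ l → pvSplitA [a] l cur = [cur.reverse ++ l] := by
  intro l cur
  induction l, cur using pvSplitA.induct [a] with
  | case1 cur => intro; simp [pvSplitA]
  | case2 c t cur h ih =>
    intro hnl
    exfalso
    have := h.1
    simp [List.isPrefixOf] at this
    exact hnl (by simp [this])
  | case3 c t cur h ih =>
    intro hnl
    rw [pvSplitA.eq_def]; simp only [dif_neg h]
    rw [ih (fun hm => hnl (List.mem_cons_of_mem c hm))]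
    simp

theorem pvReplaceGo_eq (old new : List Char) (hold : old ≠ []) :
    ∀ fuel l acc, l.length ≤ fuel →
      PySem.Chars.replace.go old new fuel l acc = acc.reverse ++ pvRepl old new l := by
  intro fuel
  induction fuel with
  | zero =>
    intro l acc hl
    have : l = [] := by cases l <;> simp_all
    subst this
    simp [PySem.Chars.replace.go, pvRepl]
  | succ f ih =>
    intro l acc hl
    cases l with
    | nil => simp [PySem.Chars.replace.go, pvRepl]
    | cons c t =>
      rw [PySem.Chars.replace.go]
      by_cases hp : old.isPrefixOf (c :: t) = true
      · have hlen := List.length_pos_of_ne_nil hold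
        rw [if_pos hp, ih _ _ (by simp only [List.length_drop, List.length_cons]; simp at hl; omega)]
        rw [pvRepl, dif_pos ⟨hp, hold⟩]
        simp
      · rw [if_neg hp, ih _ _ (by simp at hl ⊢; omega)]
        rw [pvRepl, dif_neg (by simp [hp])]
        simp

theorem pvReplace_eq (old new l : List Char) (hold : old ≠ []) :
    PySem.Chars.replace l old new = pvRepl old new l := by
  rw [PySem.Chars.replace, if_neg (by simp [hold])]
  exact pvReplaceGo_eq old new hold l.length l [] le_rfl

def pvG (result part : List Char) : List Char :=
  if PySem.Chars.isIn ['='] part = true then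
    PySem.Chars.replace result
      ('<' :: PySem.List.pyGetD (PySem.Chars.splitOnMax part ['='] 1) 0 [] ++ ['>'])
      (PySem.List.pyGetD (PySem.Chars.splitOnMax part ['='] 1) 1 [])
  else result

theorem pvAltC_eq_fold (cmd av : List Char) :
    InsertArgsAltC cmd av = (PySem.Chars.splitOn (PySem.Chars.replace av [','] ['|']) ['|']).foldl pvG cmd := rfl

theorem pvRepl_of_not_infix (old new : List Char) (_hold : old ≠ []) :
    ∀ l, ¬ old <:+: l → pvRepl old new l = l := by
  intro l
  induction l with
  | nil => intro; simp [pvRepl]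
  | cons c t ih =>
    intro h
    rw [pvRepl, dif_neg (by
      rintro ⟨hp, -⟩
      exact h ((List.isPrefixOf_iff_prefix.mp hp).isInfix))]
    rw [ih (fun hi => h (hi.trans (List.suffix_cons c t).isInfix))]

theorem pvAbase (cmd key val : List Char) (hk : key ≠ []) :
    (if PySem.Chars.isIn key cmd = true then PySem.Chars.join val (PySem.Chars.splitOn cmd key) else cmd)
      = PySem.Chars.replace cmd key val := by
  rw [pvReplace_eq _ _ _ hk]
  by_cases h : PySem.Chars.isIn key cmd = true
  · rw [if_pos h, pvSplitOn_eq _ _ hk, pvJoin_splitA _ _ hk]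
    simp
  · rw [if_neg h,
      pvRepl_of_not_infix _ _ hk _ ((PySem.Chars.isIn_eq_false_iff _ _).mp (Bool.not_eq_true _ ▸ h))]

theorem pvFoldl_id {α β : Type} (l : List α) (b : β) : l.foldl (fun acc _ => acc) b = b := by
  induction l generalizing b <;> simp_all

theorem pvA_eq_fold : ∀ fuel av cmd, pvMu av < fuel →
    InsertArgsFuel fuel cmd av = (pvSplitA ['|'] (av.map (fun c => if c = ',' then '|' else c)) []).foldl pvG cmd := by
  intro fuel
  induction fuel with
  | zero => intro av cmd h; omega
  | succ fuel ih =>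
    intro av cmd hn
    rw [InsertArgsFuel]
    simp only [pvConv_eq_map]
    set A2 := av.map (fun c => if c = ',' then '|' else c) with hA2
    by_cases he : PySem.Chars.isIn ['='] A2 = true
    · by_cases hb : PySem.Chars.isIn ['|'] A2 = true
      · -- recursive branch
        rw [if_neg (by simp [hb]), if_pos ⟨he, hb⟩]
        rw [pvSplitOn_eq _ _ (by simp)]
        refine PySem.List.foldl_congr_mem _ _ _ _ ?_
        intro acc arg harg
        have hprop := pvMem_splitA_single '|' _ _ _ harg (by simp)
        have hnb : '|' ∉ arg := hprop.1
        have hnc : ',' ∉ arg := by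
          intro hc
          rcases hprop.2 ',' hc with h1 | h2
          · simp at h1
          · exact pvNoComma_map av h2
        have hlt : pvMu arg < fuel := by
          have h1 : pvMu arg < pvMu av := by
            refine pvMu_lt_of_mem_split av A2 arg ?_ hb ?_
            · rw [pvConv_eq_map]
            · rw [pvSplitOn_eq _ _ (by simp)]; exact harg
          omega
        rw [ih arg acc hlt]
        have hmap : arg.map (fun c => if c = ',' then '|' else c) = arg := by
          conv_rhs => rw [← List.map_id arg]
          refine List.map_congr_left ?_
          intro c hc
          rw [if_neg (fun (hh : c = ',') => hnc (hh ▸ hc))]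
          rfl
        rw [hmap, pvSplitA_single_no_occ '|' arg [] hnb]
        simp [List.foldl]
      · -- base branch
        rw [if_pos ⟨he, by simpa using hb⟩]
        have hnb : '|' ∉ A2 := fun hc => hb ((pvIsIn_single _ _).mpr hc)
        rw [pvSplitA_single_no_occ '|' A2 [] hnb]
        simp only [List.nil_append, List.reverse_nil, List.foldl_cons, List.foldl_nil]
        rw [pvG, if_pos he]
        exact pvAbase cmd _ _ (by simp)
    · -- no '=' anywhere: both sides are cmd
      rw [if_neg (by simp [he]), if_neg (by simp [he])]
      have : ∀ acc arg, arg ∈ pvSplitA ['|'] A2 [] → pvG acc arg = (fun (a : List Char) (_ : List Char) => a) acc arg := by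
        intro acc arg harg
        have hprop := pvMem_splitA_single '|' _ _ _ harg (by simp)
        have hne : '=' ∉ arg := by
          intro hc
          rcases hprop.2 '=' hc with h1 | h2
          · simp at h1
          · exact he ((pvIsIn_single _ _).mpr h2)
        rw [pvG, if_neg (by simpa using fun hc => hne ((pvIsIn_single _ _).mp hc))]
      rw [PySem.List.foldl_congr_mem _ _ _ _ this, pvFoldl_id]

theorem pvMain (av cmd : List Char) : InsertArgsFuel (pvMu av + 1) cmd av = InsertArgsAltC cmd av := by
  rw [pvAltC_eq_fold, pvA_eq_fold (pvMu av + 1) av cmd (by omega),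
    pvReplace_eq _ _ _ (by simp), pvRepl_single, pvSplitOn_eq _ _ (by simp)]

-- ===== VERDICT (by name: the statement is the Claim_ definition above) =====
theorem InsertArgs_spec : Claim_equal_InsertArgs := by
  intro c a _
  unfold Spec_InsertArgs InsertArgs InsertArgs_alt
  rw [pvMain]
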